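-- pv_equiv track=rewrite | github.com/arda-kara/diffusion-model-for-scene-understanding | scene_understanding/utils/nlp_utils.py | simple_spatial_extraction
-- ===== SOURCE A (Python) =====
-- def simple_spatial_extraction(text, objects):
--     """
--     Simple rule-based extraction of spatial relationships.
--
--     Args:
--         text (str): Input text.
--         objects (list): List of object class labels.
--
--     Returns:
--         list: List of (subject, relation, object) tuples.
--     """
--     words = text.lower().split()
--     relationships = []
--
--     # Define spatial prepositions
--     spatial_preps = [
--         "on", "in", "at", "by", "near", "next", "to", "beside", "above", "below",
--         "under", "over", "behind", "front", "inside", "outside", "between"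
--     ]
--
--     # Look for patterns like "X on Y" or "X is on Y"
--     for i, word in enumerate(words):
--         if word in spatial_preps:
--             # Look for objects before and after the preposition
--             before_idx = max(0, i-3)
--             after_idx = min(len(words)-1, i+3)
--
--             before_text = ' '.join(words[before_idx:i])
--             after_text = ' '.join(words[i+1:after_idx+1])
--
--             for obj1 in objects:
--                 for obj2 in objects:
--                     if obj1 != obj2:
--                         # Check if obj1 is before the preposition and obj2 is after
--                         if obj1.lower() in before_text.lower() and obj2.lower() in after_text.lower():
--                             relationships.append((obj1, word, obj2))
--
--     return relationships
-- ===== SOURCE B (Python) =====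
-- def simple_spatial_extraction(text, objects):
--     """Rule-based extraction of (subject, preposition, object) spatial triples.
--
--     Positional algorithm: join the words once, record each word's character
--     offset, precompute every substring occurrence position of each object in
--     the full text, then answer each preposition's before/after-window test as
--     an interval-containment query over those positions (no per-window
--     substring search).
--     """
--     words = text.lower().split()
--     spatial_preps = [
--         "on", "in", "at", "by", "near", "next", "to", "beside", "above", "below",
--         "under", "over", "behind", "front", "inside", "outside", "between"
--     ]
--     full = ' '.join(words)
--     # starts[k] = character offset in full where word k begins; starts[len(words)] is a sentinel
--     starts = []
--     pos = 0
--     for w in words: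
--         starts.append(pos)
--         pos += len(w) + 1
--     starts.append(pos)
--     # every character position of full where each (lowercased) object occurs
--     occs = [[j for j in range(len(full) - len(o.lower()) + 1)
--              if full[j:j + len(o.lower())] == o.lower()]
--             for o in objects]
--
--     def span(a, b):
--         # character span [lo, hi) of ' '.join(words[a:b]) inside full
--         return (starts[a], starts[b] - 1) if a < b else (0, 0)
--
--     def hits(lo, hi):
--         # objects (with their occurrence lists) occurring inside full[lo:hi]
--         return [o for o, js in zip(objects, occs)
--                 if any(lo <= j and j + len(o.lower()) <= hi for j in js)]
--
--     relationships = []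
--     for i, word in enumerate(words):
--         if word in spatial_preps:
--             b_lo, b_hi = span(max(0, i - 3), i)
--             a_lo, a_hi = span(i + 1, min(len(words) - 1, i + 3) + 1)
--             relationships.extend(
--                 (o1, word, o2)
--                 for o1 in hits(b_lo, b_hi)
--                 for o2 in hits(a_lo, a_hi)
--                 if o1 != o2)
--     return relationships
-- ===== Notes on version B (the rewrite author's own statement) =====
-- stated objective: alternative
-- what changed: B replaces A's per-preposition-window substring tests over joined word windows by a positional index: it joins the words once, records each word's character offset, precomputes all substring occurrence positions of each object in the full text, and answers every before/after-window test as an interval-containment query over those positions.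
import Mathlib
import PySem

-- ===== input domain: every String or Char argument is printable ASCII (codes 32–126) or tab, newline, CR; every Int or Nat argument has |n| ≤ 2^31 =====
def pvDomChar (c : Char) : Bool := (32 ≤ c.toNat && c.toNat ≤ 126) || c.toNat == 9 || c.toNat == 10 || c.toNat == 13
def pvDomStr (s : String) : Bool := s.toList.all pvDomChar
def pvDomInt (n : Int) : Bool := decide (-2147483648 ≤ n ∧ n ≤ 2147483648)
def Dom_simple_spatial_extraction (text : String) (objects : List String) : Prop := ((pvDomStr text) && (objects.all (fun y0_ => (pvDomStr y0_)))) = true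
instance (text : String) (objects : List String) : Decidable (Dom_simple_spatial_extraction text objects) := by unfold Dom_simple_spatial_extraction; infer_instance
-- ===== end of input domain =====

-- B answers each preposition-window membership test by an interval query over precomputed
-- occurrence positions of each object in the once-joined text, instead of A's per-window
-- join + substring search for every ordered object pair; objective: alternative algorithm.


-- ===== PORT A =====
def simple_spatial_extraction (text : String) (objects : List String) : List (String × String × String) :=
  let words := PySem.Str.split₀ (PySem.Str.lower text)
  let spatial_preps : List String :=
    ["on", "in", "at", "by", "near", "next", "to", "beside", "above", "below",
     "under", "over", "behind", "front", "inside", "outside", "between"]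
  (PySem.List.enumerate words 0).foldl (fun relationships p =>
    if spatial_preps.contains p.2 then
      let before_idx := max 0 (p.1 - 3)
      let after_idx := min ((words.length : Int) - 1) (p.1 + 3)
      let before_text := PySem.Str.join " " (PySem.List.slice words (some before_idx) (some p.1))
      let after_text := PySem.Str.join " " (PySem.List.slice words (some (p.1 + 1)) (some (after_idx + 1)))
      objects.foldl (fun rels obj1 =>
        objects.foldl (fun rels obj2 =>
          if obj1 ≠ obj2 then
            if PySem.Str.isIn (PySem.Str.lower obj1) (PySem.Str.lower before_text)
               && PySem.Str.isIn (PySem.Str.lower obj2) (PySem.Str.lower after_text) then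
              rels ++ [(obj1, p.2, obj2)]
            else rels
          else rels) rels) relationships
    else relationships) []

-- ===== PORT B =====
def simple_spatial_extraction_alt (text : String) (objects : List String) : List (String × String × String) :=
  let words := PySem.Str.split₀ (PySem.Str.lower text)
  let spatial_preps : List String :=
    ["on", "in", "at", "by", "near", "next", "to", "beside", "above", "below",
     "under", "over", "behind", "front", "inside", "outside", "between"]
  let full := PySem.Str.join " " words
  -- starts[k] = character offset in full where word k begins; one sentinel entry at the end
  let sp := words.foldl
    (fun (acc : List Int × Int) w => (acc.1 ++ [acc.2], acc.2 + (PySem.Str.len w : Int) + 1))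
    ([], 0)
  let starts := sp.1 ++ [sp.2]
  -- every character position of full where each (lowercased) object occurs
  let occs := objects.map (fun o =>
    (PySem.List.pyRange 0 ((PySem.Str.len full : Int) - (PySem.Str.len (PySem.Str.lower o) : Int) + 1) 1).filter
      (fun j => PySem.Str.slice full (some j) (some (j + (PySem.Str.len (PySem.Str.lower o) : Int)))
                == PySem.Str.lower o))
  -- character span [lo, hi) of ' '.join(words[a:b]) inside full
  let span := fun (a b : Int) =>
    if a < b then (PySem.List.pyGetD starts a 0, PySem.List.pyGetD starts b 0 - 1)
    else ((0 : Int), (0 : Int))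
  -- objects (with their occurrence lists) occurring inside full[lo:hi]
  let hits := fun (lo hi : Int) =>
    ((objects.zip occs).filter (fun q =>
      q.2.any (fun j => decide (lo ≤ j) && decide (j + (PySem.Str.len (PySem.Str.lower q.1) : Int) ≤ hi)))).map
      Prod.fst
  (PySem.List.enumerate words 0).foldl (fun relationships p =>
    if spatial_preps.contains p.2 then
      let bs := span (max 0 (p.1 - 3)) p.1
      let az := span (p.1 + 1) (min ((words.length : Int) - 1) (p.1 + 3) + 1)
      relationships ++ (hits bs.1 bs.2).flatMap (fun o1 =>
        (hits az.1 az.2).flatMap (fun o2 => if o1 ≠ o2 then [(o1, p.2, o2)] else []))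
    else relationships) []

-- ===== PRECONDITION & SPEC =====
def Spec_simple_spatial_extraction (text : String) (objects : List String) (out : List (String × String × String)) : Prop := out = simple_spatial_extraction_alt text objects
instance (text : String) (objects : List String) (out : List (String × String × String)) : Decidable (Spec_simple_spatial_extraction text objects out) := by unfold Spec_simple_spatial_extraction; infer_instance

-- ===== CLAIM (what is proved, stated in full; the proofs are below) =====
def Claim_equal_simple_spatial_extraction : Prop := ∀ (text : String) (objects : List String), Dom_simple_spatial_extraction text objects → Spec_simple_spatial_extraction text objects (simple_spatial_extraction text objects)

-- ===== LEMMAS AND PROOFS =====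

-- Lowercasing is idempotent character-wise.
theorem ssx_lowerChar_idem (c : Char) :
    PySem.Chars.lowerChar (PySem.Chars.lowerChar c) = PySem.Chars.lowerChar c := by
  unfold PySem.Chars.lowerChar PySem.Chars.isupper
  split_ifs with h1 h2
  · exfalso
    simp only [Bool.and_eq_true, decide_eq_true_eq, Char.le_def, UInt32.le_iff_toNat_le,
      show ∀ d : Char, d.val.toNat = d.toNat from fun _ => rfl] at h1 h2
    have hv : ((c.toNat + 32)).isValidChar := by
      unfold Nat.isValidChar
      left
      have : 'Z'.toNat = 90 := by decide
      omega
    rw [Char.toNat_ofNat (c.toNat + 32), if_pos hv] at h2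
    have : 'A'.toNat = 65 := by decide
    have : 'Z'.toNat = 90 := by decide
    omega
  · rfl
  · rfl

-- Every character of a word produced by split₀ comes from the input string.
theorem ssx_split₀_go_chars (s : List Char) :
    ∀ (cur : List Char) (acc : List (List Char)),
      ∀ w ∈ PySem.Chars.split₀.go s cur acc, ∀ c ∈ w,
        c ∈ s ∨ c ∈ cur ∨ ∃ w' ∈ acc, c ∈ w' := by
  induction s with
  | nil =>
    intro cur acc w hw c hc
    rw [PySem.Chars.split₀.go] at hw
    split_ifs at hw with h
    · rw [List.mem_reverse] at hw
      exact Or.inr (Or.inr ⟨w, hw, hc⟩)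
    · rw [List.mem_reverse, List.mem_cons] at hw
      rcases hw with hw | hw
      · subst hw
        exact Or.inr (Or.inl (List.mem_reverse.mp hc))
      · exact Or.inr (Or.inr ⟨w, hw, hc⟩)
  | cons a s ih =>
    intro cur acc w hw c hc
    rw [PySem.Chars.split₀.go] at hw
    split_ifs at hw with h1 h2
    · rcases ih [] acc w hw c hc with h | h | h
      · exact Or.inl (List.mem_cons_of_mem a h)
      · simp at h
      · exact Or.inr (Or.inr h)
    · rcases ih [] (cur.reverse :: acc) w hw c hc with h | h | h
      · exact Or.inl (List.mem_cons_of_mem a h)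
      · simp at h
      · rcases h with ⟨w', hw', hc'⟩
        rcases List.mem_cons.mp hw' with h | h
        · subst h
          exact Or.inr (Or.inl (List.mem_reverse.mp hc'))
        · exact Or.inr (Or.inr ⟨w', h, hc'⟩)
    · rcases ih (a :: cur) acc w hw c hc with h | h | h
      · exact Or.inl (List.mem_cons_of_mem a h)
      · rcases List.mem_cons.mp h with h | h
        · exact Or.inl (h ▸ List.mem_cons_self)
        · exact Or.inr (Or.inl h)
      · exact Or.inr (Or.inr h)

theorem ssx_split₀_chars (s : List Char) :
    ∀ w ∈ PySem.Chars.split₀ s, ∀ c ∈ w, c ∈ s := by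
  intro w hw c hc
  rw [PySem.Chars.split₀] at hw
  rcases ssx_split₀_go_chars s [] [] w hw c hc with h | h | h
  · exact h
  · simp at h
  · simp at h

-- Words of a lowered string are already lowercase.
theorem ssx_words_lower (t : String) :
    ∀ w ∈ PySem.Str.split₀ (PySem.Str.lower t), PySem.Chars.lower w.toList = w.toList := by
  intro w hw
  have hw' : w.toList ∈ PySem.Chars.split₀ (PySem.Chars.lower t.toList) := by
    rw [← PySem.Str.toList_lower]
    rw [← PySem.Str.split₀_map_toList]
    exact List.mem_map_of_mem hw
  have hchar : ∀ c ∈ w.toList, PySem.Chars.lowerChar c = c := by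
    intro c hc
    have := ssx_split₀_chars _ _ hw' c hc
    rcases List.mem_map.mp this with ⟨c', _, hc'⟩
    rw [← hc']
    exact ssx_lowerChar_idem c'
  calc PySem.Chars.lower w.toList = w.toList.map id := List.map_congr_left hchar
    _ = w.toList := List.map_id _

-- A's inner pass over obj2, for a fixed obj1, appends exactly obj1's matched pairs.
theorem ssx_inner (P Q : String → Bool) (w o1 : String) (l : List String)
    (r : List (String × String × String)) :
    l.foldl (fun rels o2 => if o1 ≠ o2 then
        (if P o1 && Q o2 then rels ++ [(o1, w, o2)] else rels) else rels) r
      = r ++ (if P o1 then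
          ((l.filter Q).flatMap (fun o2 => if o1 ≠ o2 then [(o1, w, o2)] else [])) else []) := by
  induction l generalizing r with
  | nil => simp
  | cons a l ih =>
    simp only [List.foldl_cons, ih, List.filter_cons]
    by_cases hP : P o1 <;> by_cases hQ : Q a <;> by_cases hne : o1 = a <;>
      simp [hP, hQ, hne, List.append_assoc]

-- A's double pass over object pairs equals a filter-then-combine form.
theorem ssx_outer (P Q : String → Bool) (w : String) (l l2 : List String)
    (r : List (String × String × String)) :
    l.foldl (fun rels o1 => l2.foldl (fun rels o2 => if o1 ≠ o2 then
        (if P o1 && Q o2 then rels ++ [(o1, w, o2)] else rels) else rels) rels) r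
      = r ++ (l.filter P).flatMap (fun o1 =>
          (l2.filter Q).flatMap (fun o2 => if o1 ≠ o2 then [(o1, w, o2)] else [])) := by
  induction l generalizing r with
  | nil => simp
  | cons a l ih =>
    simp only [List.foldl_cons, ssx_inner P Q w a l2 r, ih, List.filter_cons]
    by_cases hP : P a <;> simp [hP, List.append_assoc]

-- B's zip-filter-map over (objects, occs) is a plain filter of objects.
theorem ssx_zip_map_filter {α β : Type} (l : List α) (f : α → β) (q : α → β → Bool) :
    ((l.zip (l.map f)).filter (fun p => q p.1 p.2)).map Prod.fst
      = l.filter (fun x => q x (f x)) := by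
  induction l with
  | nil => rfl
  | cons a l ih =>
    simp only [List.map_cons, List.zip_cons_cons, List.filter_cons]
    by_cases h : q a (f a) <;> simp [h, ih]

-- Cumulative character offsets: ssxS ws k = offset where word k begins in ' '.join(ws).
def ssxS (ws : List (List Char)) (k : Nat) : Nat := ((ws.take k).map (fun w => w.length + 1)).sum

theorem ssxS_add (ws : List (List Char)) (a m : Nat) :
    ssxS ws (a + m) = ssxS ws a + ssxS (ws.drop a) m := by
  unfold ssxS
  rw [List.take_add, List.map_append, List.sum_append]

theorem ssxS_cons (w : List Char) (rest : List (List Char)) (k : Nat) :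
    ssxS (w :: rest) (k + 1) = (w.length + 1) + ssxS rest k := by
  unfold ssxS
  rw [List.take_succ_cons, List.map_cons, List.sum_cons]

theorem ssxS_le (ws : List (List Char)) {a b : Nat} (h : a ≤ b) : ssxS ws a ≤ ssxS ws b := by
  have h1 := ssxS_add ws a (b - a)
  have h2 : a + (b - a) = b := by omega
  rw [h2] at h1
  omega

theorem ssxS_lt (ws : List (List Char)) {a b : Nat} (h : a < b) (hb : b ≤ ws.length) :
    ssxS ws a + 1 ≤ ssxS ws b := by
  have h1 := ssxS_add ws a (b - a)
  have h2 : a + (b - a) = b := by omega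
  rw [h2] at h1
  have h3 : 1 ≤ ssxS (ws.drop a) (b - a) := by
    cases hd : ws.drop a with
    | nil =>
      have := List.drop_eq_nil_iff.mp hd
      omega
    | cons w t =>
      have hba : b - a = (b - a - 1) + 1 := by omega
      rw [hba]
      unfold ssxS
      rw [List.take_succ_cons, List.map_cons, List.sum_cons]
      omega
  omega

theorem ssx_drop_append (A B : List Char) (n : Nat) : (A ++ B).drop (A.length + n) = B.drop n := by
  induction A with
  | nil => simp
  | cons a A ih => simpa [Nat.succ_add] using ih

theorem ssx_take_append (A B : List Char) (n : Nat) : (A ++ B).take (A.length + n) = A ++ B.take n := by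
  induction A with
  | nil => simp
  | cons a A ih => simp [Nat.succ_add, ih]

theorem ssx_join_len (ws : List (List Char)) (h : ws ≠ []) :
    (PySem.Chars.join [' '] ws).length + 1 = ssxS ws ws.length := by
  induction ws with
  | nil => exact absurd rfl h
  | cons w rest ih =>
    cases rest with
    | nil =>
      rw [PySem.Chars.join_singleton]
      unfold ssxS
      simp
    | cons b t =>
      rw [PySem.Chars.join_cons_cons]
      have ih' := ih (by simp)
      unfold ssxS at ih' ⊢
      simp only [List.length_cons, List.take_succ_cons, List.map_cons, List.sum_cons,
        List.take_length, List.length_append, List.length_nil] at ih' ⊢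
      omega

theorem ssx_drop_join (ws : List (List Char)) (a : Nat) (ha : a < ws.length) :
    (PySem.Chars.join [' '] ws).drop (ssxS ws a) = PySem.Chars.join [' '] (ws.drop a) := by
  induction a generalizing ws with
  | zero => simp [ssxS]
  | succ a ih =>
    cases ws with
    | nil => simp at ha
    | cons w rest =>
      cases rest with
      | nil => simp at ha
      | cons b t =>
        rw [PySem.Chars.join_cons_cons]
        have hS : ssxS (w :: b :: t) (a + 1) = (w.length + 1) + ssxS (b :: t) a := by
          unfold ssxS
          rw [List.take_succ_cons, List.map_cons, List.sum_cons]
        rw [hS]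
        have hkey : List.drop (w.length + 1 + ssxS (b :: t) a)
              (w ++ [' '] ++ PySem.Chars.join [' '] (b :: t))
            = List.drop (ssxS (b :: t) a) (PySem.Chars.join [' '] (b :: t)) := by
          rw [List.append_assoc]
          have := ssx_drop_append (w ++ [' ']) (PySem.Chars.join [' '] (b :: t)) (ssxS (b :: t) a)
          simpa [List.append_assoc, Nat.add_assoc] using this
        rw [hkey]
        have ha' : a < (b :: t).length := by simp at ha ⊢; omega
        rw [ih (b :: t) ha']
        simp

theorem ssx_take_join (ws : List (List Char)) (m : Nat) (h0 : 0 < m) (hm : m ≤ ws.length) :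
    (PySem.Chars.join [' '] ws).take (ssxS ws m - 1) = PySem.Chars.join [' '] (ws.take m) := by
  induction ws generalizing m with
  | nil => simp at hm; omega
  | cons w rest ih =>
    match m, h0 with
    | 1, _ =>
      have hS : ssxS (w :: rest) 1 - 1 = w.length := by
        rw [ssxS_cons]
        simp [ssxS]
      rw [hS]
      cases rest with
      | nil =>
        simp [PySem.Chars.join_singleton]
      | cons b t =>
        rw [PySem.Chars.join_cons_cons, List.append_assoc]
        have := ssx_take_append w ([' '] ++ PySem.Chars.join [' '] (b :: t)) 0
        simp only [Nat.add_zero, List.take_zero, List.append_nil] at this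
        rw [this]
        simp [PySem.Chars.join_singleton]
    | (k' + 2), _ =>
      cases rest with
      | nil => simp at hm
      | cons b t =>
        have hmk : k' + 1 ≤ (b :: t).length := by simp at hm ⊢; omega
        have h1 : 1 ≤ ssxS (b :: t) (k' + 1) := by
          have := ssxS_lt (b :: t) (a := 0) (b := k' + 1) (by omega) hmk
          simpa [ssxS] using this
        have hS : ssxS (w :: b :: t) (k' + 2) - 1
            = (w.length + 1) + (ssxS (b :: t) (k' + 1) - 1) := by
          rw [ssxS_cons]
          omega
        rw [PySem.Chars.join_cons_cons, hS, List.append_assoc]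
        have htk := ssx_take_append (w ++ [' ']) (PySem.Chars.join [' '] (b :: t))
          (ssxS (b :: t) (k' + 1) - 1)
        simp only [List.length_append, List.length_singleton, List.append_assoc] at htk
        rw [htk, ih (k' + 1) (by omega) hmk]
        simp only [List.take_succ_cons]
        rw [PySem.Chars.join_cons_cons, List.append_assoc]

theorem ssx_window_slice (ws : List (List Char)) (a b : Nat) (hab : a < b) (hb : b ≤ ws.length) :
    PySem.Chars.join [' '] ((ws.drop a).take (b - a))
      = ((PySem.Chars.join [' '] ws).drop (ssxS ws a)).take ((ssxS ws b - 1) - ssxS ws a) := by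
  rw [ssx_drop_join ws a (lt_of_lt_of_le hab hb)]
  have h1 := ssx_take_join (ws.drop a) (b - a) (by omega)
    (by rw [List.length_drop]; omega)
  have h2 : ssxS ws b = ssxS ws a + ssxS (ws.drop a) (b - a) := by
    have := ssxS_add ws a (b - a)
    rwa [show a + (b - a) = b by omega] at this
  have h3 : ssxS ws a + 1 ≤ ssxS ws b := ssxS_lt ws hab hb
  rw [← h1]
  congr 1
  omega

-- Lowercasing fixes a join of already-lowercase words.
theorem ssx_lower_join (l : List (List Char)) (h : ∀ w ∈ l, PySem.Chars.lower w = w) :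
    PySem.Chars.lower (PySem.Chars.join [' '] l) = PySem.Chars.join [' '] l := by
  induction l with
  | nil => rfl
  | cons w rest ih =>
    cases rest with
    | nil =>
      rw [PySem.Chars.join_singleton]
      exact h w List.mem_cons_self
    | cons b t =>
      rw [PySem.Chars.join_cons_cons]
      have hw := h w List.mem_cons_self
      have hrest := ih (fun w' hw' => h w' (List.mem_cons_of_mem w hw'))
      simp only [PySem.Chars.lower, List.map_append] at hw hrest ⊢
      rw [hw, hrest]
      rfl

theorem ssx_take_eq_iff (t p : List Char) : t.take p.length = p ↔ p <+: t := by
  constructor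
  · intro h
    exact h ▸ List.take_prefix _ t
  · intro h
    obtain ⟨r, rfl⟩ := h
    simpa using ssx_take_append p r 0

theorem ssx_isIn_window (full p : List Char) (lo hi : Nat) (hlo : lo ≤ hi) :
    PySem.Chars.isIn p ((full.drop lo).take (hi - lo)) = true
      ↔ ∃ j : Nat, lo ≤ j ∧ j + p.length ≤ hi ∧ p <+: full.drop j := by
  rw [← PySem.Chars.exists_prefix_drop_iff_isIn]
  have hwin : ∀ j' : Nat, ((full.drop lo).take (hi - lo)).drop j'
      = (full.drop (lo + j')).take (hi - lo - j') := by
    intro j'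
    rw [List.drop_take, List.drop_drop]
  constructor
  · rintro ⟨j', hj'⟩
    rw [hwin j', List.prefix_take_iff] at hj'
    rcases hj' with ⟨hpre, hlen⟩
    by_cases hp : p = []
    · exact ⟨lo, le_refl lo, by simp [hp]; omega, by simp [hp]⟩
    · have hplen : 1 ≤ p.length := by
        cases p with
        | nil => exact absurd rfl hp
        | cons c q => simp
      exact ⟨lo + j', by omega, by omega, hpre⟩
  · rintro ⟨j, hj1, hj2, hj3⟩
    refine ⟨j - lo, ?_⟩
    rw [hwin (j - lo), List.prefix_take_iff, show lo + (j - lo) = j by omega]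
    exact ⟨hj3, by omega⟩

-- The port's slice-equality test recognises exactly the occurrence positions.
theorem ssx_slice_eq_iff (full p : String) (j : Nat) :
    ((PySem.Str.slice full (some (j : Int)) (some ((j : Int) + (PySem.Str.len p : Int))) == p) = true)
      ↔ p.toList <+: full.toList.drop j := by
  have key : (PySem.Str.slice full (some (j : Int)) (some ((j : Int) + (PySem.Str.len p : Int)))).toList
      = (full.toList.drop j).take p.toList.length := by
    simp [pysem, PySem.List.slice_natCast_add]
  rw [beq_iff_eq, ← ssx_take_eq_iff, ← key, String.toList_inj]

-- B's interval query over precomputed positions = substring test on the window (nonempty window).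
theorem ssx_pred_eq (full p : String) (lo hi : Nat) (hlo : lo ≤ hi) (hhi : hi ≤ PySem.Str.len full) :
    ((PySem.List.pyRange 0 ((PySem.Str.len full : Int) - (PySem.Str.len p : Int) + 1) 1).filter
        (fun j => PySem.Str.slice full (some j) (some (j + (PySem.Str.len p : Int))) == p)).any
      (fun j => decide ((lo : Int) ≤ j) && decide (j + (PySem.Str.len p : Int) ≤ (hi : Int)))
      = PySem.Chars.isIn p.toList ((full.toList.drop lo).take (hi - lo)) := by
  have hlen : PySem.Str.len full = full.toList.length := by simp [pysem]
  have hplen : PySem.Str.len p = p.toList.length := by simp [pysem]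
  rw [Bool.eq_iff_iff, List.any_eq_true, ssx_isIn_window full.toList p.toList lo hi hlo]
  constructor
  · rintro ⟨j, hjmem, hcond⟩
    rw [List.mem_filter, PySem.List.mem_pyRange_one] at hjmem
    obtain ⟨⟨hj0, hjT⟩, hjsl⟩ := hjmem
    simp only [Bool.and_eq_true, decide_eq_true_eq] at hcond
    obtain ⟨hjlo, hjhi⟩ := hcond
    refine ⟨j.toNat, by omega, by omega, ?_⟩
    rw [← ssx_slice_eq_iff full p j.toNat, Int.toNat_of_nonneg hj0]
    exact hjsl
  · rintro ⟨jn, hjlo, hjhi, hjpre⟩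
    have hpre_len := hjpre.length_le
    rw [List.length_drop] at hpre_len
    refine ⟨(jn : Int), ?_, ?_⟩
    · rw [List.mem_filter, PySem.List.mem_pyRange_one]
      refine ⟨⟨by omega, by omega⟩, (ssx_slice_eq_iff full p jn).mpr hjpre⟩
    · simp only [Bool.and_eq_true, decide_eq_true_eq]
      omega

-- The same, for an empty window (span (0,0)).
theorem ssx_pred_empty (full p : String) :
    ((PySem.List.pyRange 0 ((PySem.Str.len full : Int) - (PySem.Str.len p : Int) + 1) 1).filter
        (fun j => PySem.Str.slice full (some j) (some (j + (PySem.Str.len p : Int))) == p)).any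
      (fun j => decide ((0 : Int) ≤ j) && decide (j + (PySem.Str.len p : Int) ≤ (0 : Int)))
      = PySem.Chars.isIn p.toList [] := by
  have hplen : PySem.Str.len p = p.toList.length := by simp [pysem]
  have hlen : PySem.Str.len full = full.toList.length := by simp [pysem]
  rw [Bool.eq_iff_iff, List.any_eq_true]
  by_cases hp : p.toList = []
  · have hR : PySem.Chars.isIn p.toList [] = true := by
      rw [hp]
      exact PySem.Chars.isIn_nil []
    rw [hR]
    have hp0 : PySem.Str.len p = 0 := by
      rw [hplen, hp]
      rfl
    constructor
    · intro _; trivial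
    · intro _
      refine ⟨0, ?_, ?_⟩
      · rw [List.mem_filter, PySem.List.mem_pyRange_one]
        refine ⟨⟨le_refl 0, by omega⟩, ?_⟩
        have h0 : ((0 : Nat) : Int) = (0 : Int) := rfl
        rw [← h0, ssx_slice_eq_iff full p 0, hp]
        exact List.nil_prefix
      · simp only [Bool.and_eq_true, decide_eq_true_eq]
        omega
  · have hR : PySem.Chars.isIn p.toList [] = false := by
      rw [PySem.Chars.isIn_eq_false_iff]
      intro hinf
      exact hp (List.eq_nil_of_infix_nil hinf)
    rw [hR]
    constructor
    · rintro ⟨j, hjmem, hcond⟩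
      rw [List.mem_filter, PySem.List.mem_pyRange_one] at hjmem
      simp only [Bool.and_eq_true, decide_eq_true_eq] at hcond
      have hplen1 : 1 ≤ p.toList.length := by
        cases hq : p.toList with
        | nil => exact absurd hq hp
        | cons c q => simp
      omega
    · intro h
      exact absurd h Bool.false_ne_true

-- The foldl building the offsets list is the map of ssxS over the word indices.
theorem ssx_starts_foldl (words : List String) (acc0 : List Int) (c0 : Int) :
    words.foldl (fun (acc : List Int × Int) w => (acc.1 ++ [acc.2], acc.2 + (PySem.Str.len w : Int) + 1)) (acc0, c0)
      = (acc0 ++ (List.range words.length).map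
            (fun k => c0 + (ssxS (words.map String.toList) k : Int)),
         c0 + (ssxS (words.map String.toList) words.length : Int)) := by
  induction words generalizing acc0 c0 with
  | nil => simp [ssxS]
  | cons w rest ih =>
    rw [List.foldl_cons, ih, Prod.ext_iff]
    have hw : (PySem.Str.len w : Int) = (w.toList.length : Int) := by simp [pysem]
    simp only [List.map_cons, List.length_cons, List.length_map]
    constructor
    · rw [List.append_assoc, List.singleton_append]
      congr 1
      rw [List.range_succ_eq_map, List.map_cons, List.map_map]
      congr 1
      · simp [ssxS]
      · apply List.map_congr_left
        intro k _
        simp only [Function.comp_apply, ssxS_cons]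
        push_cast [hw]
        ring
    · rw [show rest.length + 1 = (List.map String.toList rest).length + 1 by rw [List.length_map],
        ssxS_cons]
      push_cast [hw]
      rw [List.length_map]
      ring

theorem ssx_map_range_snoc (f : Nat → Int) (n : Nat) :
    (List.range n).map f ++ [f n] = (List.range (n + 1)).map f := by
  rw [List.range_succ, List.map_append, List.map_singleton]

-- One object's interval query over its occurrence positions = A's window substring test.
set_option maxHeartbeats 1000000 in
theorem ssx_window_nonempty (words : List String)
    (hlow : ∀ w ∈ words, PySem.Chars.lower w.toList = w.toList)
    (o : String) (a b : Nat) (hab : a < b) (hb : b ≤ words.length) :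
    (((PySem.List.pyRange 0 ((PySem.Str.len (PySem.Str.join " " words) : Int) - (PySem.Str.len (PySem.Str.lower o) : Int) + 1) 1).filter
        (fun j => PySem.Str.slice (PySem.Str.join " " words) (some j) (some (j + (PySem.Str.len (PySem.Str.lower o) : Int)))
                  == PySem.Str.lower o)).any
      (fun j => decide (((ssxS (words.map String.toList) a : Nat) : Int) ≤ j)
        && decide (j + (PySem.Str.len (PySem.Str.lower o) : Int) ≤ ((ssxS (words.map String.toList) b : Nat) : Int) - 1)))
      = PySem.Str.isIn (PySem.Str.lower o)
          (PySem.Str.lower (PySem.Str.join " " ((words.drop a).take (b - a)))) := by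
  have hbm : b ≤ (words.map String.toList).length := by rw [List.length_map]; exact hb
  have h1 : ssxS (words.map String.toList) a + 1 ≤ ssxS (words.map String.toList) b :=
    ssxS_lt _ hab hbm
  have hne : (words.map String.toList) ≠ [] := by
    intro h0
    rw [h0] at hbm
    simp at hbm
    omega
  have hfull : (PySem.Str.join " " words).toList
      = PySem.Chars.join [' '] (words.map String.toList) := by
    rw [PySem.Str.toList_join, (by decide : " ".toList = [' '])]
  have hflen : (PySem.Str.len (PySem.Str.join " " words) : Int)
      = ((PySem.Chars.join [' '] (words.map String.toList)).length : Int) := by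
    rw [PySem.Str.len_eq, hfull]
  have hjl := ssx_join_len (words.map String.toList) hne
  have hSle := ssxS_le (words.map String.toList) hbm
  have hhi : ((ssxS (words.map String.toList) b - 1 : Nat) : Int) ≤ PySem.Str.len (PySem.Str.join " " words) := by
    rw [hflen]
    omega
  have hcast : ((ssxS (words.map String.toList) b : Nat) : Int) - 1
      = (((ssxS (words.map String.toList) b - 1 : Nat) : Nat) : Int) := by omega
  rw [hcast,
    ssx_pred_eq (PySem.Str.join " " words) (PySem.Str.lower o)
      (ssxS (words.map String.toList) a) (ssxS (words.map String.toList) b - 1)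
      (by omega) hhi]
  have hsub : ∀ w ∈ ((words.map String.toList).drop a).take (b - a), PySem.Chars.lower w = w := by
    intro w hw
    have hw1 : w ∈ words.map String.toList :=
      List.mem_of_mem_drop (List.mem_of_mem_take hw)
    obtain ⟨w', hw', rfl⟩ := List.mem_map.mp hw1
    exact hlow w' hw'
  have hwin : (PySem.Str.lower (PySem.Str.join " " ((words.drop a).take (b - a)))).toList
      = ((PySem.Str.join " " words).toList.drop (ssxS (words.map String.toList) a)).take
          ((ssxS (words.map String.toList) b - 1) - ssxS (words.map String.toList) a) := by
    have hmaps : ((words.drop a).take (b - a)).map String.toList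
        = ((words.map String.toList).drop a).take (b - a) := by
      rw [List.map_take, List.map_drop]
    calc (PySem.Str.lower (PySem.Str.join " " ((words.drop a).take (b - a)))).toList
        = PySem.Chars.lower (PySem.Chars.join [' ']
            (((words.map String.toList).drop a).take (b - a))) := by
          rw [PySem.Str.toList_lower, PySem.Str.toList_join,
            (by decide : " ".toList = [' ']), hmaps]
      _ = PySem.Chars.join [' '] (((words.map String.toList).drop a).take (b - a)) :=
          ssx_lower_join _ hsub
      _ = ((PySem.Str.join " " words).toList.drop (ssxS (words.map String.toList) a)).take
            ((ssxS (words.map String.toList) b - 1) - ssxS (words.map String.toList) a) := by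
          rw [hfull]
          exact ssx_window_slice _ a b hab hbm
  have hA : PySem.Str.isIn (PySem.Str.lower o)
        (PySem.Str.lower (PySem.Str.join " " ((words.drop a).take (b - a))))
      = PySem.Chars.isIn (PySem.Str.lower o).toList
        (((PySem.Str.join " " words).toList.drop (ssxS (words.map String.toList) a)).take
          ((ssxS (words.map String.toList) b - 1) - ssxS (words.map String.toList) a)) := by
    rw [← hwin]
    rw [PySem.Str.isIn_eq]
  rw [hA]

-- The same, for an empty window (span (0,0)).
theorem ssx_window_empty (words : List String) (o : String) :
    (((PySem.List.pyRange 0 ((PySem.Str.len (PySem.Str.join " " words) : Int) - (PySem.Str.len (PySem.Str.lower o) : Int) + 1) 1).filter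
        (fun j => PySem.Str.slice (PySem.Str.join " " words) (some j) (some (j + (PySem.Str.len (PySem.Str.lower o) : Int)))
                  == PySem.Str.lower o)).any
      (fun j => decide ((0 : Int) ≤ j)
        && decide (j + (PySem.Str.len (PySem.Str.lower o) : Int) ≤ (0 : Int))))
      = PySem.Str.isIn (PySem.Str.lower o)
          (PySem.Str.lower (PySem.Str.join " " ([] : List String))) := by
  rw [ssx_pred_empty (PySem.Str.join " " words) (PySem.Str.lower o)]
  simp only [PySem.Str.isIn_eq, PySem.Str.toList_lower, PySem.Str.toList_join,
    List.map_nil, PySem.Chars.join_nil]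
  simp [PySem.Chars.lower]

-- One preposition occurrence: A's pairwise pass = B's zip-filter combine, given
-- pointwise equality of the window membership predicates.
theorem ssx_step (objects : List String) (w : String) (f : String → List Int)
    (pB qB : String → List Int → Bool) (PA QA : String → Bool)
    (acc : List (String × String × String))
    (hP : ∀ o ∈ objects, pB o (f o) = PA o) (hQ : ∀ o ∈ objects, qB o (f o) = QA o) :
    objects.foldl (fun rels obj1 => objects.foldl (fun rels obj2 => if obj1 ≠ obj2 then
        (if PA obj1 && QA obj2 then rels ++ [(obj1, w, obj2)] else rels) else rels) rels) acc
    = acc ++ (((objects.zip (objects.map f)).filter (fun q => pB q.1 q.2)).map Prod.fst).flatMap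
        (fun o1 => (((objects.zip (objects.map f)).filter (fun q => qB q.1 q.2)).map Prod.fst).flatMap
          (fun o2 => if o1 ≠ o2 then [(o1, w, o2)] else [])) := by
  rw [ssx_outer PA QA w objects objects acc,
    ssx_zip_map_filter objects f (fun x js => pB x js),
    ssx_zip_map_filter objects f (fun x js => qB x js),
    List.filter_congr hP, List.filter_congr hQ]

-- ===== VERDICT (by name: the statement is the Claim_ definition above) =====
set_option maxHeartbeats 2000000 in
theorem simple_spatial_extraction_spec : Claim_equal_simple_spatial_extraction := by
  intro text objects _
  unfold Spec_simple_spatial_extraction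
  have hlow := ssx_words_lower text
  simp only [simple_spatial_extraction, simple_spatial_extraction_alt]
  generalize hW : PySem.Str.split₀ (PySem.Str.lower text) = words
  rw [hW] at hlow
  simp only [ssx_starts_foldl, List.nil_append, zero_add, ssx_map_range_snoc]
  apply PySem.List.foldl_congr_mem
  intro acc p hp
  rw [PySem.List.mem_enumerate_iff] at hp
  obtain ⟨k, hk, hpk⟩ := hp
  subst hpk
  dsimp only
  simp only [zero_add]
  split
  next hc =>
    have hn1 : 1 ≤ words.length := by omega
    have hgd : ∀ i : Nat, i < words.length + 1 →
        (List.map (fun i => ((ssxS (words.map String.toList) i : Nat) : Int))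
          (List.range (words.length + 1))).getD i 0
        = ((ssxS (words.map String.toList) i : Nat) : Int) :=
      fun i hi => PySem.List.getD_map_range _ _ _ _ hi
    by_cases hk0 : 0 < k
    · rw [if_pos (show max 0 ((k : Int) - 3) < ((k : Int)) by omega)]
      by_cases hkn : k + 1 < words.length
      · rw [if_pos (show ((k : Int)) + 1
              < min ((words.length : Int) - 1) ((k : Int) + 3) + 1 by omega)]
        refine ssx_step objects words[k] (fun o => List.filter (fun j => PySem.Str.slice (PySem.Str.join " " words) (some j) (some (j + PySem.Str.len (PySem.Str.lower o))) == PySem.Str.lower o) (PySem.List.pyRange 0 (PySem.Str.len (PySem.Str.join " " words) - PySem.Str.len (PySem.Str.lower o) + 1) 1)) (fun x js => js.any (fun j => decide (PySem.List.pyGetD (List.map (fun i => ((ssxS (words.map String.toList) i : Nat) : Int)) (List.range (words.length + 1))) (max 0 ((k : Int) - 3)) 0 ≤ j) && decide (j + PySem.Str.len (PySem.Str.lower x) ≤ PySem.List.pyGetD (List.map (fun i => ((ssxS (words.map String.toList) i : Nat) : Int)) (List.range (words.length + 1))) ((k : Int)) 0 - 1))) (fun x js => js.any (fun j => decide (PySem.List.pyGetD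 (List.map (fun i => ((ssxS (words.map String.toList) i : Nat) : Int)) (List.range (words.length + 1))) ((k : Int) + 1) 0 ≤ j) && decide (j + PySem.Str.len (PySem.Str.lower x) ≤ PySem.List.pyGetD (List.map (fun i => ((ssxS (words.map String.toList) i : Nat) : Int)) (List.range (words.length + 1))) (min ((words.length : Int) - 1) ((k : Int) + 3) + 1) 0 - 1))) (fun o => PySem.Str.isIn (PySem.Str.lower o) (PySem.Str.lower (PySem.Str.join " " (PySem.List.slice words (some (max 0 ((k : Int) - 3))) (some ((k : Int))))))) (fun o => PySem.Str.isIn (PySem.Str.lower o) (PySem.Str.lower (PySem.Str.join " " (PySem.List.slice words (some (((k : Int)) + 1)) (some (min ((words.length : Int) - 1) ((k : Int) + 3) + 1)))))) acc ?_ ?_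
        · intro o _
          rw [show (max 0 ((k : Int) - 3)) = ((k - 3 : Nat) : Int) by omega,
            show ((k : Int)) = ((k : Nat) : Int) from rfl,
            PySem.List.slice_natCast, PySem.List.pyGetD_natCast, PySem.List.pyGetD_natCast,
            hgd (k - 3) (by omega), hgd k (by omega)]
          exact ssx_window_nonempty words hlow o (k - 3) k (by omega) (by omega)
        · intro o _
          rw [show ((k : Int)) + 1 = ((k + 1 : Nat) : Int) by omega,
            show min ((words.length : Int) - 1) ((k : Int) + 3) + 1
              = ((min (words.length - 1) (k + 3) + 1 : Nat) : Int) by omega,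
            PySem.List.slice_natCast, PySem.List.pyGetD_natCast, PySem.List.pyGetD_natCast,
            hgd (k + 1) (by omega), hgd (min (words.length - 1) (k + 3) + 1) (by omega)]
          exact ssx_window_nonempty words hlow o (k + 1)
            (min (words.length - 1) (k + 3) + 1) (by omega) (by omega)
      · rw [if_neg (show ¬ (((k : Int)) + 1
              < min ((words.length : Int) - 1) ((k : Int) + 3) + 1) by omega)]
        refine ssx_step objects words[k] (fun o => List.filter (fun j => PySem.Str.slice (PySem.Str.join " " words) (some j) (some (j + PySem.Str.len (PySem.Str.lower o))) == PySem.Str.lower o) (PySem.List.pyRange 0 (PySem.Str.len (PySem.Str.join " " words) - PySem.Str.len (PySem.Str.lower o) + 1) 1)) (fun x js => js.any (fun j => decide (PySem.List.pyGetD (List.map (fun i => ((ssxS (words.map String.toList) i : Nat) : Int)) (List.range (words.length + 1))) (max 0 ((k : Int) - 3)) 0 ≤ j) && decide (j + PySem.Str.len (PySem.Str.lower x) ≤ PySem.List.pyGetD (List.map (fun i => ((ssxS (words.map String.toList) i : Nat) : Int)) (List.range (words.length + 1))) ((k : Int)) 0 - 1))) (fun x js => js.any (fun j => decide ((0 : Int)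 ≤ j) && decide (j + PySem.Str.len (PySem.Str.lower x) ≤ (0 : Int)))) (fun o => PySem.Str.isIn (PySem.Str.lower o) (PySem.Str.lower (PySem.Str.join " " (PySem.List.slice words (some (max 0 ((k : Int) - 3))) (some ((k : Int))))))) (fun o => PySem.Str.isIn (PySem.Str.lower o) (PySem.Str.lower (PySem.Str.join " " (PySem.List.slice words (some (((k : Int)) + 1)) (some (min ((words.length : Int) - 1) ((k : Int) + 3) + 1)))))) acc ?_ ?_
        · intro o _
          rw [show (max 0 ((k : Int) - 3)) = ((k - 3 : Nat) : Int) by omega,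
            show ((k : Int)) = ((k : Nat) : Int) from rfl,
            PySem.List.slice_natCast, PySem.List.pyGetD_natCast, PySem.List.pyGetD_natCast,
            hgd (k - 3) (by omega), hgd k (by omega)]
          exact ssx_window_nonempty words hlow o (k - 3) k (by omega) (by omega)
        · intro o _
          rw [show ((k : Int)) + 1 = ((k + 1 : Nat) : Int) by omega,
            show min ((words.length : Int) - 1) ((k : Int) + 3) + 1
              = ((min (words.length - 1) (k + 3) + 1 : Nat) : Int) by omega,
            PySem.List.slice_natCast,
            show min (words.length - 1) (k + 3) + 1 - (k + 1) = 0 by omega, List.take_zero]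
          exact ssx_window_empty words o
    · have hkz : k = 0 := by omega
      subst hkz
      rw [if_neg (show ¬ (max 0 (((0 : Nat) : Int) - 3) < (((0 : Nat) : Int))) by omega)]
      by_cases hkn : 0 + 1 < words.length
      · rw [if_pos (show (((0 : Nat) : Int)) + 1
              < min ((words.length : Int) - 1) (((0 : Nat) : Int) + 3) + 1 by omega)]
        refine ssx_step objects words[0] (fun o => List.filter (fun j => PySem.Str.slice (PySem.Str.join " " words) (some j) (some (j + PySem.Str.len (PySem.Str.lower o))) == PySem.Str.lower o) (PySem.List.pyRange 0 (PySem.Str.len (PySem.Str.join " " words) - PySem.Str.len (PySem.Str.lower o) + 1) 1)) (fun x js => js.any (fun j => decide ((0 : Int) ≤ j) && decide (j + PySem.Str.len (PySem.Str.lower x) ≤ (0 : Int)))) (fun x js => js.any (fun j => decide (PySem.List.pyGetD (List.map (fun i => ((ssxS (words.map String.toList) i : Nat) : Int)) (List.range (words.length + 1))) (((0 : Nat) : Int) + 1) 0 ≤ j) && decide (j + PySem.Str.len (PySem.Str.lower x) ≤ PySem.List.pyGetD (List.map (fun i => ((ssxS (words.map String.toList) i : Nat) : Int)) (List.range (words.length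 + 1))) (min ((words.length : Int) - 1) (((0 : Nat) : Int) + 3) + 1) 0 - 1))) (fun o => PySem.Str.isIn (PySem.Str.lower o) (PySem.Str.lower (PySem.Str.join " " (PySem.List.slice words (some (max 0 (((0 : Nat) : Int) - 3))) (some (((0 : Nat) : Int))))))) (fun o => PySem.Str.isIn (PySem.Str.lower o) (PySem.Str.lower (PySem.Str.join " " (PySem.List.slice words (some ((((0 : Nat) : Int)) + 1)) (some (min ((words.length : Int) - 1) (((0 : Nat) : Int) + 3) + 1)))))) acc ?_ ?_
        · intro o _
          rw [show (max 0 (((0 : Nat) : Int) - 3)) = ((0 : Nat) : Int) by omega,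
            PySem.List.slice_natCast]
          simp only [Nat.sub_self, List.take_zero]
          exact ssx_window_empty words o
        · intro o _
          rw [show (((0 : Nat) : Int)) + 1 = ((0 + 1 : Nat) : Int) by omega,
            show min ((words.length : Int) - 1) (((0 : Nat) : Int) + 3) + 1
              = ((min (words.length - 1) (0 + 3) + 1 : Nat) : Int) by omega,
            PySem.List.slice_natCast, PySem.List.pyGetD_natCast, PySem.List.pyGetD_natCast,
            hgd (0 + 1) (by omega), hgd (min (words.length - 1) (0 + 3) + 1) (by omega)]
          exact ssx_window_nonempty words hlow o (0 + 1)
            (min (words.length - 1) (0 + 3) + 1) (by omega) (by omega)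
      · rw [if_neg (show ¬ ((((0 : Nat) : Int)) + 1
              < min ((words.length : Int) - 1) (((0 : Nat) : Int) + 3) + 1) by omega)]
        refine ssx_step objects words[0] (fun o => List.filter (fun j => PySem.Str.slice (PySem.Str.join " " words) (some j) (some (j + PySem.Str.len (PySem.Str.lower o))) == PySem.Str.lower o) (PySem.List.pyRange 0 (PySem.Str.len (PySem.Str.join " " words) - PySem.Str.len (PySem.Str.lower o) + 1) 1)) (fun x js => js.any (fun j => decide ((0 : Int) ≤ j) && decide (j + PySem.Str.len (PySem.Str.lower x) ≤ (0 : Int)))) (fun x js => js.any (fun j => decide ((0 : Int) ≤ j) && decide (j + PySem.Str.len (PySem.Str.lower x) ≤ (0 : Int)))) (fun o => PySem.Str.isIn (PySem.Str.lower o) (PySem.Str.lower (PySem.Str.join " " (PySem.List.slice words (some (max 0 (((0 : Nat) : Int) - 3))) (some (((0 : Nat) : Int))))))) (fun o => PySem.Str.isIn (PySem.Str.lower o) (PySem.Str.lower (PySem.Str.join " " (PySem.List.slice words (some ((((0 : Nat) : Int)) + 1)) (some (min ((words.length : Int) - 1) (((0 : Nat) : Int) + 3) + 1)))))) acc ?_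 ?_
        · intro o _
          rw [show (max 0 (((0 : Nat) : Int) - 3)) = ((0 : Nat) : Int) by omega,
            PySem.List.slice_natCast]
          simp only [Nat.sub_self, List.take_zero]
          exact ssx_window_empty words o
        · intro o _
          rw [show (((0 : Nat) : Int)) + 1 = ((0 + 1 : Nat) : Int) by omega,
            show min ((words.length : Int) - 1) (((0 : Nat) : Int) + 3) + 1
              = ((min (words.length - 1) (0 + 3) + 1 : Nat) : Int) by omega,
            PySem.List.slice_natCast,
            show min (words.length - 1) (0 + 3) + 1 - (0 + 1) = 0 by omega, List.take_zero]
          exact ssx_window_empty words o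
  next hc => rfl
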